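-- pv_equiv track=rewrite | github.com/liz-hunter/entropidae | 05-entropy/calc_entropy.py | tax_distance
-- ===== SOURCE A (Python) =====
-- def get_lineage(taxid, parent_map):
--     lineage = []
--     while taxid in parent_map and taxid != parent_map[taxid]:
--         lineage.append(taxid)
--         taxid = parent_map[taxid]
--     lineage.append(taxid)  # root
--     return lineage
--
-- def tax_distance(t1, t2, parent_map):
--     if t1 == t2:
--         return 0
--     lineage1 = get_lineage(t1, parent_map)
--     lineage2 = get_lineage(t2, parent_map)
--     set1 = set(lineage1)
--     for i, anc2 in enumerate(lineage2):
--         if anc2 in set1: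
--             j = lineage1.index(anc2)
--             return i + j  # steps up + steps down
--     return None  # No common ancestor (shouldn't happen)
-- ===== SOURCE B (Python) =====
-- def get_lineage(taxid, parent_map):
--     lineage = []
--     while taxid in parent_map and taxid != parent_map[taxid]:
--         lineage.append(taxid)
--         taxid = parent_map[taxid]
--     lineage.append(taxid)  # root
--     return lineage
--
-- def tax_distance(t1, t2, parent_map):
--     if t1 == t2:
--         return 0
--     r1 = get_lineage(t1, parent_map)[::-1]
--     r2 = get_lineage(t2, parent_map)[::-1]
--     c = 0
--     while c < len(r1) and c < len(r2) and r1[c] == r2[c]: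
--         c += 1
--     if c == 0:
--         return None  # roots differ: no common ancestor
--     return len(r1) + len(r2) - 2 * c
-- ===== Notes on version B (the rewrite author's own statement) =====
-- stated objective: alternative
-- what changed: A searches lineage2 front-to-back for the first ancestor present in set(lineage1) and calls lineage1.index on it; B instead counts c, the length of the common root-end suffix of the two reversed lineages, and returns len1 + len2 - 2*c (None when c == 0), removing the membership scan and the index pass.
import Mathlib
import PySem

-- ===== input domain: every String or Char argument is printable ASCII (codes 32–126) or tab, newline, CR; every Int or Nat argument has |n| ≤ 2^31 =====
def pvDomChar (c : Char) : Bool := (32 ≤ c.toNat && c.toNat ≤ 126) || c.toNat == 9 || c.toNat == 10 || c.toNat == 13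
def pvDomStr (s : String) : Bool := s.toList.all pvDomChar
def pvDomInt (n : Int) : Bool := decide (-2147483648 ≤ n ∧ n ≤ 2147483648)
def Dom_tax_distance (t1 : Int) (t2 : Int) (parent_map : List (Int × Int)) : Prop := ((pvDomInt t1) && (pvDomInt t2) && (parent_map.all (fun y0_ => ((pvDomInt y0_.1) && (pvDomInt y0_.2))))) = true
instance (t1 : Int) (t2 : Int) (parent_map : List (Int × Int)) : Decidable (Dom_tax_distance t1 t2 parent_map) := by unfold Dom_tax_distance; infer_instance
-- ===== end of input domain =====

-- B replaces A's scan-and-index search for the first common ancestor by the root-end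
-- common-suffix count c and the closed formula len1 + len2 - 2*c (objective: alternative).

-- ===== PORT A =====
-- Python dict lookup: parent_map arrives as dict(parent_map-pairs) (later duplicates overwrite)
def pvStep (pm : List (Int × Int)) (t : Int) : Option Int :=
  (PySem.Dict.ofList pm).get? t

-- get_lineage's while loop, fuel-recursive; under Pre_ the chain stops within pm.length
-- steps, so fuel pm.length + 1 makes this compute exactly Python's lineage list.
def pvLineage (pm : List (Int × Int)) : Nat → Int → List Int
  | 0, t => [t]
  | f+1, t =>
    match pvStep pm t with
    | none => [t]
    | some p => if t = p then [t] else t :: pvLineage pm f p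

-- the 'for i, anc2 in enumerate(lineage2)' loop of A
def pvScan (set1 : PySem.Set Int) (l1 : List Int) : List Int → Int → Option Int
  | [], _ => none
  | a :: rest, i =>
    if PySem.Set.contains set1 a then
      match PySem.List.index? l1 a with
      | some j => some (i + (j : Int))
      | none => none   -- dead: the membership guard just succeeded
    else pvScan set1 l1 rest (i + 1)

def tax_distance (t1 : Int) (t2 : Int) (parent_map : List (Int × Int)) : Option Int :=
  if t1 = t2 then some 0
  else
    let lineage1 := pvLineage parent_map (parent_map.length + 1) t1
    let lineage2 := pvLineage parent_map (parent_map.length + 1) t2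
    pvScan (PySem.Set.ofList lineage1) lineage1 lineage2 0

-- ===== PORT B =====
-- the 'while c < len(r1) and c < len(r2) and r1[c] == r2[c]' counter of Source B
def pvPref : List Int → List Int → Nat
  | a :: as_, b :: bs => if a = b then pvPref as_ bs + 1 else 0
  | _, _ => 0

def tax_distance_alt (t1 : Int) (t2 : Int) (parent_map : List (Int × Int)) : Option Int :=
  if t1 = t2 then some 0
  else
    let r1 := (pvLineage parent_map (parent_map.length + 1) t1).reverse  -- [::-1]
    let r2 := (pvLineage parent_map (parent_map.length + 1) t2).reverse  -- [::-1]
    let c := pvPref r1 r2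
    if c = 0 then none
    else some ((r1.length : Int) + (r2.length : Int) - 2 * (c : Int))

-- ===== PRECONDITION & SPEC =====
-- pvTerm pm f t: the parent chain from t reaches a fixpoint/absent key within f steps.
def pvTerm (pm : List (Int × Int)) : Nat → Int → Bool
  | 0, t => match pvStep pm t with | none => true | some p => t == p
  | f+1, t =>
    match pvStep pm t with
    | none => true
    | some p => t == p || pvTerm pm f p

-- Pre_ excludes exactly the inputs on which the Python A never returns (its while loop
-- spins on a parent cycle): t1 ≠ t2 and the parent chain from t1 or t2 hits a cycle.
-- Whether a chain in the DATA terminates is not expressible by bounds/shapes alone;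
-- pvTerm is that termination condition itself (it follows the parent pointers but builds
-- nothing and decides nothing about tax_distance's value), with fuel pm.length, which is
-- exact: an acyclic chain stops within pm.length steps, a cyclic one never does.
def Pre_tax_distance (t1 : Int) (t2 : Int) (parent_map : List (Int × Int)) : Prop :=
  t1 = t2 ∨ (pvTerm parent_map parent_map.length t1 = true ∧ pvTerm parent_map parent_map.length t2 = true)
instance (t1 : Int) (t2 : Int) (parent_map : List (Int × Int)) : Decidable (Pre_tax_distance t1 t2 parent_map) := by unfold Pre_tax_distance; infer_instance

def pvWitness_tax_distance : Int × Int × (List (Int × Int)) := (1, 2, [(1, 3), (2, 3)])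

def Spec_tax_distance (t1 : Int) (t2 : Int) (parent_map : List (Int × Int)) (out : Option Int) : Prop := out = tax_distance_alt t1 t2 parent_map
instance (t1 : Int) (t2 : Int) (parent_map : List (Int × Int)) (out : Option Int) : Decidable (Spec_tax_distance t1 t2 parent_map out) := by unfold Spec_tax_distance; infer_instance

-- ===== CLAIM (what is proved, stated in full; the proofs are below) =====
def Claim_equal_tax_distance : Prop := ∀ (t1 : Int) (t2 : Int) (parent_map : List (Int × Int)), Dom_tax_distance t1 t2 parent_map → Pre_tax_distance t1 t2 parent_map → Spec_tax_distance t1 t2 parent_map (tax_distance t1 t2 parent_map)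

-- ===== LEMMAS AND PROOFS =====

-- one-step unfolding lemmas for the fueled while-loops
theorem pvLineage_none (pm : List (Int × Int)) (f : Nat) (t : Int)
    (hs : pvStep pm t = none) : pvLineage pm (f + 1) t = [t] := by
  simp [pvLineage, hs]

theorem pvLineage_self (pm : List (Int × Int)) (f : Nat) (t : Int)
    (hs : pvStep pm t = some t) : pvLineage pm (f + 1) t = [t] := by
  simp [pvLineage, hs]

theorem pvLineage_step (pm : List (Int × Int)) (f : Nat) (t p : Int)
    (hs : pvStep pm t = some p) (ht : t ≠ p) :
    pvLineage pm (f + 1) t = t :: pvLineage pm f p := by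
  simp [pvLineage, hs, ht]

theorem pvTerm_none (pm : List (Int × Int)) (f : Nat) (t : Int)
    (hs : pvStep pm t = none) : pvTerm pm f t = true := by
  cases f <;> simp [pvTerm, hs]

theorem pvTerm_self (pm : List (Int × Int)) (f : Nat) (t : Int)
    (hs : pvStep pm t = some t) : pvTerm pm f t = true := by
  cases f <;> simp [pvTerm, hs]

theorem pvTerm_step (pm : List (Int × Int)) (f : Nat) (t p : Int)
    (hs : pvStep pm t = some p) (ht : t ≠ p) :
    pvTerm pm (f + 1) t = pvTerm pm f p := by
  simp [pvTerm, hs, ht]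

theorem pvTerm_zero_step_false (pm : List (Int × Int)) (t p : Int)
    (hs : pvStep pm t = some p) (ht : t ≠ p) : pvTerm pm 0 t = false := by
  simp [pvTerm, hs, ht]

-- every lineage starts with its argument
theorem pvLineage_head (pm : List (Int × Int)) (f : Nat) (t : Int) :
    ∃ r, pvLineage pm f t = t :: r := by
  cases f with
  | zero => exact ⟨[], rfl⟩
  | succ f =>
    cases h : pvStep pm t with
    | none => exact ⟨[], pvLineage_none pm f t h⟩
    | some p =>
      by_cases ht : t = p
      · subst ht; exact ⟨[], pvLineage_self pm f t h⟩
      · exact ⟨pvLineage pm f p, pvLineage_step pm f t p h ht⟩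

theorem pvTerm_succ (pm : List (Int × Int)) (f : Nat) (t : Int)
    (h : pvTerm pm f t = true) : pvTerm pm (f + 1) t = true := by
  induction f generalizing t with
  | zero =>
    cases hs : pvStep pm t with
    | none => exact pvTerm_none pm 1 t hs
    | some p =>
      by_cases ht : t = p
      · subst ht; exact pvTerm_self pm 1 t hs
      · rw [pvTerm_zero_step_false pm t p hs ht] at h; exact absurd h (by simp)
  | succ f ih =>
    cases hs : pvStep pm t with
    | none => exact pvTerm_none pm _ t hs
    | some p =>
      by_cases ht : t = p
      · subst ht; exact pvTerm_self pm _ t hs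
      · rw [pvTerm_step pm (f + 1) t p hs ht]
        rw [pvTerm_step pm f t p hs ht] at h
        exact ih p h

theorem pvLineage_stable (pm : List (Int × Int)) (f : Nat) (t : Int)
    (h : pvTerm pm f t = true) : pvLineage pm (f + 1) t = pvLineage pm f t := by
  induction f generalizing t with
  | zero =>
    cases hs : pvStep pm t with
    | none => exact pvLineage_none pm 0 t hs
    | some p =>
      by_cases ht : t = p
      · subst ht; exact pvLineage_self pm 0 t hs
      · rw [pvTerm_zero_step_false pm t p hs ht] at h; exact absurd h (by simp)
  | succ f ih =>
    cases hs : pvStep pm t with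
    | none => rw [pvLineage_none pm (f + 1) t hs, pvLineage_none pm f t hs]
    | some p =>
      by_cases ht : t = p
      · subst ht; rw [pvLineage_self pm (f + 1) t hs, pvLineage_self pm f t hs]
      · rw [pvLineage_step pm (f + 1) t p hs ht, pvLineage_step pm f t p hs ht]
        rw [pvTerm_step pm f t p hs ht] at h
        rw [ih p h]

theorem pvTerm_mem (pm : List (Int × Int)) (f : Nat) (t x : Int)
    (h : pvTerm pm f t = true) (hx : x ∈ pvLineage pm f t) : pvTerm pm f x = true := by
  induction f generalizing t with
  | zero =>
    simp [pvLineage] at hx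
    subst hx; exact h
  | succ f ih =>
    cases hs : pvStep pm t with
    | none =>
      rw [pvLineage_none pm f t hs] at hx
      simp at hx; subst hx; exact h
    | some p =>
      by_cases ht : t = p
      · subst ht
        rw [pvLineage_self pm f t hs] at hx
        simp at hx; subst hx; exact h
      · rw [pvLineage_step pm f t p hs ht] at hx
        rw [pvTerm_step pm f t p hs ht] at h
        rcases List.mem_cons.mp hx with hx | hx
        · subst hx; rw [pvTerm_step pm f x p hs ht]; exact h
        · exact pvTerm_succ pm f x (ih p h hx)

theorem pvLineage_suffix (pm : List (Int × Int)) (f : Nat) (t x : Int)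
    (h : pvTerm pm f t = true) (hx : x ∈ pvLineage pm f t) :
    pvLineage pm f x <:+ pvLineage pm f t := by
  induction f generalizing t with
  | zero =>
    simp [pvLineage] at hx ⊢
    subst hx; rfl
  | succ f ih =>
    cases hs : pvStep pm t with
    | none =>
      rw [pvLineage_none pm f t hs] at hx
      simp at hx; subst hx; rfl
    | some p =>
      by_cases ht : t = p
      · subst ht
        rw [pvLineage_self pm f t hs] at hx
        simp at hx; subst hx; rfl
      · rw [pvLineage_step pm f t p hs ht] at hx ⊢
        rw [pvTerm_step pm f t p hs ht] at h
        rcases List.mem_cons.mp hx with hx | hx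
        · subst hx
          rw [pvLineage_step pm f x p hs ht]
        · have hsuf := ih p h hx
          have htx : pvTerm pm f x = true := pvTerm_mem pm f p x h hx
          rw [pvLineage_stable pm f x htx]
          exact hsuf.trans (List.suffix_cons _ _)

theorem pvLineage_nodup (pm : List (Int × Int)) (f : Nat) (t : Int)
    (h : pvTerm pm f t = true) : (pvLineage pm f t).Nodup := by
  induction f generalizing t with
  | zero => simp [pvLineage]
  | succ f ih =>
    cases hs : pvStep pm t with
    | none => rw [pvLineage_none pm f t hs]; simp
    | some p =>
      by_cases ht : t = p
      · subst ht; rw [pvLineage_self pm f t hs]; simp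
      · rw [pvLineage_step pm f t p hs ht]
        rw [pvTerm_step pm f t p hs ht] at h
        refine List.nodup_cons.mpr ⟨?_, ih p h⟩
        intro hmem
        have htf : pvTerm pm f t = true := pvTerm_mem pm f p t h hmem
        have hsuf : pvLineage pm f t <:+ pvLineage pm f p :=
          pvLineage_suffix pm f p t h hmem
        have hst : pvLineage pm (f + 1) t = pvLineage pm f t :=
          pvLineage_stable pm f t htf
        have hlen := hsuf.length_le
        rw [pvLineage_step pm f t p hs ht] at hst
        rw [← hst] at hlen
        simp at hlen

-- longest common prefix: pvPref is at least the length of any common prefix …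
theorem pvPref_ge (P X Y : List Int) (hX : P <+: X) (hY : P <+: Y) :
    P.length ≤ pvPref X Y := by
  induction P generalizing X Y with
  | nil => simp
  | cons a P ih =>
    obtain ⟨u, rfl⟩ := hX
    obtain ⟨v, rfl⟩ := hY
    simpa [pvPref] using ih (P ++ u) (P ++ v) ⟨u, rfl⟩ ⟨v, rfl⟩

-- … and at most each length
theorem pvPref_le_right (X Y : List Int) : pvPref X Y ≤ Y.length := by
  induction X generalizing Y with
  | nil => simp [pvPref]
  | cons a as ih =>
    cases Y with
    | nil => simp [pvPref]
    | cons b bs =>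
      by_cases h : a = b
      · simpa [pvPref, h] using ih bs
      · simp [pvPref, h]

-- appending an element absent from X cannot extend the common prefix
theorem pvPref_append_singleton_of_not_mem (X Y : List Int) (b : Int) (hb : b ∉ X) :
    pvPref X (Y ++ [b]) = pvPref X Y := by
  induction X generalizing Y with
  | nil => rfl
  | cons x xs ih =>
    cases Y with
    | nil =>
      have : x ≠ b := by intro h; exact hb (by simp [h])
      simp [pvPref, this]
    | cons y ys =>
      by_cases h : x = y
      · have hbx : b ∉ xs := fun hm => hb (List.mem_cons_of_mem _ hm)
        simp [pvPref, h, ih ys hbx]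
      · simp [pvPref, h]

-- the heart: A's enumerate-scan computes B's closed formula, given that every common
-- element heads a common suffix of the two (duplicate-free) lineages
theorem pvScan_eq (A : List Int) (B : List Int) (i : Int)
    (hA : A.Nodup) (hB : B.Nodup)
    (hcom : ∀ x, x ∈ A → x ∈ B → ∃ S, S.head? = some x ∧ S <:+ A ∧ S <:+ B) :
    pvScan (PySem.Set.ofList A) A B i =
      (if pvPref A.reverse B.reverse = 0 then none
       else some (i + ((A.length : Int) + (B.length : Int)
                        - 2 * ((pvPref A.reverse B.reverse : Nat) : Int)))) := by
  induction B generalizing i with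
  | nil => simp [pvScan, pvPref]
  | cons b B' ih =>
    by_cases hmem : b ∈ A
    · -- b is the first common element; its common suffix is all of b :: B'
      obtain ⟨S, hhead, hSA, hSB⟩ := hcom b hmem (by simp)
      -- S = b :: B'
      have hbS : b ∈ S := by
        cases S with
        | nil => simp at hhead
        | cons s0 S' => simp at hhead; simp [hhead]
      have hS : S = b :: B' := by
        obtain ⟨u, hu⟩ := hSB
        cases u with
        | nil => simpa using hu
        | cons c u' =>
          exfalso
          simp at hu
          obtain ⟨hcb, hB'eq⟩ := hu
          have hbB' : b ∈ B' := by rw [← hB'eq]; exact List.mem_append_right _ hbS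
          exact (List.nodup_cons.mp hB).1 hbB'
      subst hS
      -- index of b in A from the suffix decomposition
      obtain ⟨v, hv⟩ := hSA
      have hbv : b ∉ v := by
        have := hA
        rw [← hv] at this
        rw [List.nodup_append] at this
        exact fun hm => this.2.2 b hm b (by simp) rfl
      have hidx : PySem.List.index? A b = some v.length := by
        rw [PySem.List.index?_eq_some_iff]
        exact ⟨v, B', by rw [← hv], rfl, hbv⟩
      -- the common-suffix count is |b :: B'|
      have hge : (b :: B').length ≤ pvPref A.reverse (b :: B').reverse := by
        have := pvPref_ge (b :: B').reverse A.reverse (b :: B').reverse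
          (List.reverse_prefix.mpr ⟨v, hv⟩) List.prefix_rfl
        simpa using this
      have hle : pvPref A.reverse (b :: B').reverse ≤ (b :: B').length := by
        simpa using pvPref_le_right A.reverse (b :: B').reverse
      have hc : pvPref A.reverse (b :: B').reverse = B'.length + 1 := by
        simp only [List.length_cons] at hge hle; omega
      have hlenA : A.length = v.length + (B'.length + 1) := by
        rw [← hv]; simp
      have hbmem : PySem.Set.contains (PySem.Set.ofList A) b = true := by
        simp [pysem, hmem]
      simp only [pvScan, hbmem, if_pos, hidx, hc]
      rw [if_neg (by omega)]
      congr 1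
      simp only [List.length_cons, hlenA]
      push_cast
      ring
    · -- b not in A: step past it; the count over B' is unchanged
      have hbmem : PySem.Set.contains (PySem.Set.ofList A) b = false := by
        simp [pysem, hmem]
      have hpref : pvPref A.reverse (b :: B').reverse = pvPref A.reverse B'.reverse := by
        have : (b :: B').reverse = B'.reverse ++ [b] := by simp
        rw [this, pvPref_append_singleton_of_not_mem _ _ _ (by simpa using hmem)]
      have hcom' : ∀ x, x ∈ A → x ∈ B' → ∃ S, S.head? = some x ∧ S <:+ A ∧ S <:+ B' := by
        intro x hxA hxB
        obtain ⟨S, hhead, hSA, hSB⟩ := hcom x hxA (by simp [hxB])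
        refine ⟨S, hhead, hSA, ?_⟩
        rcases List.suffix_cons_iff.mp hSB with h | h
        · exfalso
          rw [h] at hhead
          simp at hhead
          exact hmem (hhead ▸ hxA)
        · exact h
      simp only [pvScan, hbmem, Bool.false_eq_true, if_false, hpref]
      rw [ih (i + 1) (hB.of_cons) hcom']
      by_cases hz : pvPref A.reverse B'.reverse = 0
      · simp [hz]
      · rw [if_neg hz, if_neg hz]
        congr 1
        push_cast [List.length_cons]
        ring

-- ===== VERDICT (by name: the statement is the Claim_ definition above) =====
theorem tax_distance_spec : Claim_equal_tax_distance := by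
  intro t1 t2 pm _ hpre
  unfold Spec_tax_distance tax_distance tax_distance_alt
  by_cases heq : t1 = t2
  · simp [heq]
  · rcases hpre with hpre | ⟨h1, h2⟩
    · exact absurd hpre heq
    · rw [if_neg heq, if_neg heq]
      have h1' : pvTerm pm (pm.length + 1) t1 = true := pvTerm_succ pm pm.length t1 h1
      have h2' : pvTerm pm (pm.length + 1) t2 = true := pvTerm_succ pm pm.length t2 h2
      set F := pm.length + 1 with hF
      have hA : (pvLineage pm F t1).Nodup := pvLineage_nodup pm F t1 h1'
      have hB : (pvLineage pm F t2).Nodup := pvLineage_nodup pm F t2 h2'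
      have hcom : ∀ x, x ∈ pvLineage pm F t1 → x ∈ pvLineage pm F t2 →
          ∃ S, S.head? = some x ∧ S <:+ pvLineage pm F t1 ∧ S <:+ pvLineage pm F t2 := by
        intro x hx1 hx2
        obtain ⟨r, hr⟩ := pvLineage_head pm F x
        exact ⟨pvLineage pm F x, by rw [hr]; rfl,
          pvLineage_suffix pm F t1 x h1' hx1, pvLineage_suffix pm F t2 x h2' hx2⟩
      rw [pvScan_eq _ _ 0 hA hB hcom]
      by_cases hz : pvPref (pvLineage pm F t1).reverse (pvLineage pm F t2).reverse = 0
      · simp [hz]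
      · rw [if_neg hz, if_neg hz]
        simp
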